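-- pv_equiv track=rewrite | github.com/moong94/python_team_note | BOJ/Basic/ex3.py | solution
-- ===== SOURCE A (Python) =====
-- def solution(drawing):
--     answer = []
--     length = len(drawing)
--     temp_map = [[0 for _ in range(length)] for _ in range(length)]
--     for y in range(length):
--         for x in range(length):
--             if drawing[y][x] == '1':
--                 temp_map[y][x] += 1
--                 temp_map[length - x - 1][y] += 1
--                 temp_map[x][length - y - 1] += 1
--                 temp_map[length - y - 1][length - x - 1] += 1
--     for i in range(length):
--         tmp_string = ''
--         for j in range(length):
--             tmp_string += str(temp_map[i][j])
--         answer.append(tmp_string)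
--     return answer
-- ===== SOURCE B (Python) =====
-- def solution(drawing):
--     n = len(drawing)
--
--     def cnt(i, j):
--         # the four cells of (i, j)'s rotation orbit, with multiplicity
--         cells = [drawing[i][j], drawing[n - 1 - j][i],
--                  drawing[j][n - 1 - i], drawing[n - 1 - i][n - 1 - j]]
--         return cells.count('1')
--
--     return [''.join(str(cnt(i, j)) for j in range(n)) for i in range(n)]
-- ===== Notes on version B (the rewrite author's own statement) =====
-- stated objective: simpler
-- what changed: Instead of scattering each '1' into four cells of an intermediate temp_map grid and then rendering the grid, B has no grid at all: each output digit is computed directly as the count of '1' among the four rotation-orbit source cells of that position.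
import Mathlib
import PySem

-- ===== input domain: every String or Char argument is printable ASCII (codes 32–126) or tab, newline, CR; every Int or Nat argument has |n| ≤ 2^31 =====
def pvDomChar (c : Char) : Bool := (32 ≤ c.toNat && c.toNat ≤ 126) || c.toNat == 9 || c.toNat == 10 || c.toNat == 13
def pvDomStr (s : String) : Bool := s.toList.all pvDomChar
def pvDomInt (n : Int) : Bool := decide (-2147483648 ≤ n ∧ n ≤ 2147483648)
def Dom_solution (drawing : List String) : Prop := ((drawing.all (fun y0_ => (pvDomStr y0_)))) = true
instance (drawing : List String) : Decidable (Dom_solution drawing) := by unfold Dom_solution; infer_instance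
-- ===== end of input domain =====

-- B removes A's intermediate temp_map grid: each output digit is gathered directly as the
-- count of '1' among the four rotation-orbit source cells of its position (objective: simpler).

-- ===== PORT A =====
-- drawing[y][x] (both ports use it; under Pre_ every access is in range, so the defaults never fire)
def pvGetC (drawing : List String) (y x : Nat) : Char :=
  ((drawing.getD y "").toList).getD x ' '

-- temp_map[a][b] += 1
def pvUpd (m : List (List Int)) (a b : Nat) : List (List Int) :=
  m.modify a (fun row => row.modify b (· + 1))

-- body of A's double loop for one (y, x)
def pvStep (drawing : List String) (n : Nat) (m : List (List Int)) (y x : Nat) : List (List Int) :=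
  if pvGetC drawing y x = '1' then
    pvUpd (pvUpd (pvUpd (pvUpd m y x) (n - x - 1) y) x (n - y - 1)) (n - y - 1) (n - x - 1)
  else m

-- temp_map after the scatter loop
def pvTemp (drawing : List String) (n : Nat) : List (List Int) :=
  (List.range n).foldl
    (fun m y => (List.range n).foldl (fun m x => pvStep drawing n m y x) m)
    (List.replicate n (List.replicate n (0 : Int)))

def solution (drawing : List String) : List String :=
  let n := drawing.length
  let temp := pvTemp drawing n
  (List.range n).foldl
    (fun answer i =>
      answer ++ [(List.range n).foldl
        (fun s j => s ++ PySem.Int.toStr ((temp.getD i []).getD j 0)) ""]) []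

-- ===== PORT B =====
-- count of '1' among the four rotation-orbit cells of (i, j)
def pvCnt (drawing : List String) (n i j : Nat) : Nat :=
  PySem.List.count
    [pvGetC drawing i j, pvGetC drawing (n - 1 - j) i,
     pvGetC drawing j (n - 1 - i), pvGetC drawing (n - 1 - i) (n - 1 - j)] '1'

def solution_alt (drawing : List String) : List String :=
  let n := drawing.length
  (List.range n).map (fun i =>
    PySem.Str.join "" ((List.range n).map (fun j =>
      PySem.Int.toStr ((pvCnt drawing n i j : Int)))))

-- ===== PRECONDITION & SPEC =====
-- Python A indexes drawing[y][x] for all y, x < len(drawing); it raises IndexError (and so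
-- does B) exactly when some row is shorter than the number of rows, so those inputs are excluded.
def Pre_solution (drawing : List String) : Prop :=
  ∀ s ∈ drawing, drawing.length ≤ s.toList.length
instance (drawing : List String) : Decidable (Pre_solution drawing) := by
  unfold Pre_solution; infer_instance
def pvWitness_solution : List String := ["111", "101", "110"]

def Spec_solution (drawing : List String) (out : List String) : Prop := out = solution_alt drawing
instance (drawing : List String) (out : List String) : Decidable (Spec_solution drawing out) := by
  unfold Spec_solution; infer_instance

-- ===== CLAIM (what is proved, stated in full; the proofs are below) =====
def Claim_equal_solution : Prop :=
  ∀ (drawing : List String), Dom_solution drawing → Pre_solution drawing →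
    Spec_solution drawing (solution drawing)

-- ===== LEMMAS AND PROOFS =====

-- entry (i, j) of the grid
def pvGet (m : List (List Int)) (i j : Nat) : Int := ((m[i]?.getD [])[j]?).getD 0

-- the grid is n × n
def pvSh (n : Nat) (m : List (List Int)) : Prop :=
  m.length = n ∧ ∀ r ∈ m, r.length = n

-- what A's body at (y, x) adds to entry (i, j)
def pvContrib (drawing : List String) (n y x i j : Nat) : Int :=
  if pvGetC drawing y x = '1' then
    (if y = i ∧ x = j then 1 else 0) + (if n - x - 1 = i ∧ y = j then 1 else 0)
    + (if x = i ∧ n - y - 1 = j then 1 else 0)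
    + (if n - y - 1 = i ∧ n - x - 1 = j then 1 else 0)
  else 0

lemma pvSh_upd {n : Nat} {m : List (List Int)} (h : pvSh n m) (a b : Nat) :
    pvSh n (pvUpd m a b) := by
  obtain ⟨h1, h2⟩ := h
  refine ⟨by simp [pvUpd, h1], ?_⟩
  intro r hr
  rw [List.mem_iff_getElem] at hr
  obtain ⟨k, hk, rfl⟩ := hr
  simp only [pvUpd, List.getElem_modify]
  split
  · simp only [List.length_modify]
    exact h2 _ (List.getElem_mem _)
  · exact h2 _ (List.getElem_mem _)

lemma pvGet_upd {n : Nat} {m : List (List Int)} (h : pvSh n m) {a b i j : Nat}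
    (hi : i < n) (hj : j < n) :
    pvGet (pvUpd m a b) i j = pvGet m i j + (if a = i ∧ b = j then 1 else 0) := by
  obtain ⟨h1, h2⟩ := h
  have hi' : i < m.length := h1 ▸ hi
  have hrow : m[i].length = n := h2 _ (List.getElem_mem _)
  have hj' : j < m[i].length := hrow ▸ hj
  rw [pvGet, pvGet, pvUpd, List.getElem?_modify]
  by_cases hai : a = i
  · subst hai
    rw [List.getElem?_eq_getElem hi']
    simp only [Option.getD_some, true_and]
    by_cases hbj : b = j
    · subst hbj
      simp [List.getElem?_eq_getElem hj']
    · simp [hbj]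
  · simp only [if_neg hai]
    have : (if a = i ∧ b = j then (1 : Int) else 0) = 0 := by simp [hai]
    rw [this, add_zero]
    cases m[i]? <;> simp

lemma pvSh_step (drawing : List String) {n : Nat} {m : List (List Int)} (h : pvSh n m)
    (y x : Nat) : pvSh n (pvStep drawing n m y x) := by
  rw [pvStep]
  split
  · exact pvSh_upd (pvSh_upd (pvSh_upd (pvSh_upd h _ _) _ _) _ _) _ _
  · exact h

lemma pvGet_step (drawing : List String) {n : Nat} {m : List (List Int)}
    (h : pvSh n m) {y x i j : Nat} (hi : i < n) (hj : j < n) :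
    pvGet (pvStep drawing n m y x) i j = pvGet m i j + pvContrib drawing n y x i j := by
  rw [pvStep, pvContrib]
  split
  · rw [pvGet_upd (pvSh_upd (pvSh_upd (pvSh_upd h _ _) _ _) _ _) hi hj,
      pvGet_upd (pvSh_upd (pvSh_upd h _ _) _ _) hi hj,
      pvGet_upd (pvSh_upd h _ _) hi hj,
      pvGet_upd h hi hj]
    ring
  · simp

-- inner loop: fold over a list of x's
lemma pvGet_foldl_inner (drawing : List String) {n : Nat} (y : Nat)
    {i j : Nat} (hi : i < n) (hj : j < n) :
    ∀ (xs : List Nat), ∀ (m : List (List Int)), pvSh n m →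
      pvSh n (xs.foldl (fun m x => pvStep drawing n m y x) m) ∧
      pvGet (xs.foldl (fun m x => pvStep drawing n m y x) m) i j
        = pvGet m i j + (xs.map (fun x => pvContrib drawing n y x i j)).sum := by
  intro xs
  induction xs with
  | nil => intro m hm; simp [hm]
  | cons a t ih =>
    intro m hm
    obtain ⟨hsh, hget⟩ := ih _ (pvSh_step drawing hm y a)
    refine ⟨by simpa using hsh, ?_⟩
    simp only [List.foldl_cons, List.map_cons, List.sum_cons]
    rw [hget, pvGet_step drawing hm hi hj]
    ring

-- outer loop: fold over a list of y's
lemma pvGet_foldl_outer (drawing : List String) {n : Nat} {i j : Nat} (hi : i < n) (hj : j < n) :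
    ∀ (ys : List Nat), ∀ (m : List (List Int)), pvSh n m →
      pvSh n (ys.foldl (fun m y => (List.range n).foldl (fun m x => pvStep drawing n m y x) m) m) ∧
      pvGet (ys.foldl (fun m y => (List.range n).foldl (fun m x => pvStep drawing n m y x) m) m) i j
        = pvGet m i j
          + (ys.map (fun y => ((List.range n).map (fun x => pvContrib drawing n y x i j)).sum)).sum := by
  intro ys
  induction ys with
  | nil => intro m hm; simp [hm]
  | cons a t ih =>
    intro m hm
    obtain ⟨hsh1, hget1⟩ := pvGet_foldl_inner drawing a hi hj (List.range n) m hm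
    obtain ⟨hsh, hget⟩ := ih _ hsh1
    refine ⟨by simpa using hsh, ?_⟩
    simp only [List.foldl_cons, List.map_cons, List.sum_cons]
    rw [hget, hget1]
    ring

lemma pvSum_delta {n : Nat} (g : Nat → Int) {a : Nat} (ha : a < n) :
    ((List.range n).map (fun x => if x = a then g x else 0)).sum = g a := by
  induction n with
  | zero => omega
  | succ k ih =>
    rw [List.range_succ]
    by_cases hak : a = k
    · subst hak
      have : ((List.range a).map (fun x => if x = a then g x else 0)).sum = 0 := by
        apply List.sum_eq_zero
        intro z hz
        simp only [List.mem_map, List.mem_range] at hz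
        obtain ⟨x, hx, rfl⟩ := hz
        simp [Nat.ne_of_lt hx]
      simp [this]
    · have ha' : a < k := by omega
      have hka : k ≠ a := fun h => hak h.symm
      simp [ih ha', hka]

-- double delta: the scatter sum over all (y, x) picks exactly the cell (a, b)
lemma pvSum_delta2 {n : Nat} (f : Nat → Nat → Int) {a b : Nat} (ha : a < n) (hb : b < n) :
    ((List.range n).map (fun y =>
      ((List.range n).map (fun x => if y = a ∧ x = b then f y x else 0)).sum)).sum = f a b := by
  have h1 : ∀ y, ((List.range n).map (fun x => if y = a ∧ x = b then f y x else 0)).sum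
      = if y = a then f y b else 0 := by
    intro y
    by_cases hya : y = a
    · subst hya
      simp only [true_and]
      exact pvSum_delta (f y) hb
    · rw [if_neg hya]
      apply List.sum_eq_zero
      intro z hz
      simp only [List.mem_map, List.mem_range] at hz
      obtain ⟨x, hx, rfl⟩ := hz
      simp [hya]
  calc ((List.range n).map (fun y =>
          ((List.range n).map (fun x => if y = a ∧ x = b then f y x else 0)).sum)).sum
      = ((List.range n).map (fun y => if y = a then f y b else 0)).sum := by
        exact congrArg List.sum (List.map_congr_left (fun y _ => h1 y))
    _ = f a b := pvSum_delta (fun y => f y b) ha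

-- a 0/1 indicator for one source cell
def pvInd (drawing : List String) (y x : Nat) : Int :=
  if pvGetC drawing y x = '1' then 1 else 0

lemma pvContrib_split {drawing : List String} {n : Nat} (y x i j : Nat)
    (hy : y < n) (hx : x < n) (hi : i < n) (hj : j < n) :
    pvContrib drawing n y x i j
      = (if y = i ∧ x = j then pvInd drawing y x else 0)
        + (if y = n - 1 - j ∧ x = i then pvInd drawing y x else 0)
        + (if y = j ∧ x = n - 1 - i then pvInd drawing y x else 0)
        + (if y = n - 1 - i ∧ x = n - 1 - j then pvInd drawing y x else 0) := by
  rw [pvContrib, pvInd]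
  have e1 : (y = i ∧ x = j) ↔ (y = i ∧ x = j) := Iff.rfl
  have e2 : (n - x - 1 = i ∧ y = j) ↔ (y = j ∧ x = n - 1 - i) := by omega
  have e3 : (x = i ∧ n - y - 1 = j) ↔ (y = n - 1 - j ∧ x = i) := by omega
  have e4 : (n - y - 1 = i ∧ n - x - 1 = j) ↔ (y = n - 1 - i ∧ x = n - 1 - j) := by omega
  split
  · rw [if_congr e2 rfl rfl, if_congr e3 rfl rfl, if_congr e4 rfl rfl]
    ring
  · simp

-- B's count, as the sum of the four indicators
lemma pvCnt_eq_inds (drawing : List String) (n i j : Nat) :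
    (pvCnt drawing n i j : Int)
      = pvInd drawing i j + pvInd drawing (n - 1 - j) i
        + pvInd drawing j (n - 1 - i) + pvInd drawing (n - 1 - i) (n - 1 - j) := by
  rw [pvCnt, PySem.List.count, pvInd, pvInd, pvInd, pvInd]
  by_cases h1 : pvGetC drawing i j = '1' <;>
    by_cases h2 : pvGetC drawing (n - 1 - j) i = '1' <;>
      by_cases h3 : pvGetC drawing j (n - 1 - i) = '1' <;>
        by_cases h4 : pvGetC drawing (n - 1 - i) (n - 1 - j) = '1' <;>
          simp [h1, h2, h3, h4]

-- THE CORE: entry (i, j) of A's finished grid is B's count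
lemma pvTemp_get (drawing : List String) {n i j : Nat} (hi : i < n) (hj : j < n) :
    pvGet (pvTemp drawing n) i j = (pvCnt drawing n i j : Int) := by
  have hsh0 : pvSh n (List.replicate n (List.replicate n (0 : Int))) := by
    constructor
    · simp
    · intro r hr
      rw [List.eq_of_mem_replicate hr]
      simp
  have hget0 : pvGet (List.replicate n (List.replicate n (0 : Int))) i j = 0 := by
    simp [pvGet, hi, hj]
  obtain ⟨-, hget⟩ := pvGet_foldl_outer drawing hi hj (List.range n) _ hsh0
  rw [pvTemp, hget, hget0, zero_add]
  have hsplit : ∀ y ∈ List.range n,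
      ((List.range n).map (fun x => pvContrib drawing n y x i j)).sum
        = ((List.range n).map (fun x => if y = i ∧ x = j then pvInd drawing y x else 0)).sum
          + ((List.range n).map (fun x => if y = n - 1 - j ∧ x = i then pvInd drawing y x else 0)).sum
          + ((List.range n).map (fun x => if y = j ∧ x = n - 1 - i then pvInd drawing y x else 0)).sum
          + ((List.range n).map (fun x => if y = n - 1 - i ∧ x = n - 1 - j then pvInd drawing y x else 0)).sum := by
    intro y hymem
    have hy : y < n := List.mem_range.mp hymem
    have hmap : ((List.range n).map (fun x => pvContrib drawing n y x i j)).sum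
        = ((List.range n).map (fun x =>
            (if y = i ∧ x = j then pvInd drawing y x else 0)
            + ((if y = n - 1 - j ∧ x = i then pvInd drawing y x else 0)
            + ((if y = j ∧ x = n - 1 - i then pvInd drawing y x else 0)
            + (if y = n - 1 - i ∧ x = n - 1 - j then pvInd drawing y x else 0))))).sum := by
      refine congrArg List.sum (List.map_congr_left ?_)
      intro x hxmem
      rw [pvContrib_split y x i j hy (List.mem_range.mp hxmem) hi hj]
      ring
    rw [hmap, PySem.List.sum_map_add_int, PySem.List.sum_map_add_int, PySem.List.sum_map_add_int]
    ring
  rw [congrArg List.sum (List.map_congr_left hsplit)]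
  rw [PySem.List.sum_map_add_int, PySem.List.sum_map_add_int, PySem.List.sum_map_add_int]
  have hi' : n - 1 - i < n := by omega
  have hj' : n - 1 - j < n := by omega
  rw [pvSum_delta2 (fun y x => pvInd drawing y x) hi hj,
    pvSum_delta2 (fun y x => pvInd drawing y x) hj' hi,
    pvSum_delta2 (fun y x => pvInd drawing y x) hj hi',
    pvSum_delta2 (fun y x => pvInd drawing y x) hi' hj',
    pvCnt_eq_inds]

-- rendering: A's '+='-built row, at the List Char level
lemma pvFoldl_str_toList (f : Nat → String) :
    ∀ (l : List Nat) (s0 : String),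
      (l.foldl (fun s j => s ++ f j) s0).toList
        = s0.toList ++ (l.map (fun j => (f j).toList)).flatten := by
  intro l
  induction l with
  | nil => simp
  | cons a t ih =>
    intro s0
    simp only [List.foldl_cons, List.map_cons, List.flatten_cons]
    rw [ih, String.toList_append, List.append_assoc]

-- ''.join is concatenation
lemma pvJoin_nil_toList :
    ∀ (parts : List String),
      (PySem.Str.join "" parts).toList = (parts.map String.toList).flatten := by
  intro parts
  rw [PySem.Str.toList_join]
  induction parts with
  | nil => simp [PySem.Chars.join_nil]
  | cons a t ih =>
    cases t with
    | nil => simp [PySem.Chars.join, List.intercalate]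
    | cons b r =>
      simp only [List.map_cons] at ih ⊢
      rw [PySem.Chars.join_cons_cons, ih]
      simp

lemma pvRow_eq (drawing : List String) (n : Nat)
    {i : Nat} (hi : i < n) :
    (List.range n).foldl
        (fun s j => s ++ PySem.Int.toStr (((pvTemp drawing n).getD i []).getD j 0)) ""
      = PySem.Str.join "" ((List.range n).map (fun j =>
          PySem.Int.toStr ((pvCnt drawing n i j : Int)))) := by
  apply String.toList_inj.mp
  rw [pvFoldl_str_toList, pvJoin_nil_toList, List.map_map]
  simp only [String.toList_empty, List.nil_append]
  refine congrArg List.flatten (List.map_congr_left ?_)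
  intro j hj
  have hj' : j < n := List.mem_range.mp hj
  have hcell : pvGet (pvTemp drawing n) i j = (pvCnt drawing n i j : Int) :=
    pvTemp_get drawing hi hj'
  simp only [Function.comp, List.getD_eq_getElem?_getD, PySem.Int.toList_toStr]
  rw [show ((pvTemp drawing n)[i]?.getD [])[j]?.getD 0 = (pvCnt drawing n i j : Int) from hcell]

-- ===== VERDICT (by name: the statement is the Claim_ definition above) =====
theorem solution_spec : Claim_equal_solution := by
  intro drawing _ _
  unfold Spec_solution solution solution_alt
  rw [PySem.List.foldl_append_singleton_eq_map]
  simp only [List.nil_append]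
  refine List.map_congr_left ?_
  intro i hi
  exact pvRow_eq drawing drawing.length (List.mem_range.mp hi)
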